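-- pv_equiv track=rewrite | github.com/Prachi15600/Placement-Preparation-Module | 2114-maximum-number-of-words-found-in-sentences/2114-maximum-number-of-words-found-in-sentences.py | mostWordsFound
-- ===== SOURCE A (Python) =====
-- from typing import List
--
-- def mostWordsFound(sentences: List[str]) -> int:
--     Max = 0
--     for i in sentences:
--         Count = 0
--         for j in i:
--             if j == " ":
--                 Count = Count + 1
--         Max = max(Max,Count)
--     return Max+1
-- ===== SOURCE B (Python) =====
-- from typing import List
--
-- def mostWordsFound(sentences: List[str]) -> int:
--     return max((len(s.split(" ")) for s in sentences), default=1)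
-- ===== Notes on version B (the rewrite author's own statement) =====
-- stated objective: simpler
-- what changed: Replaces the nested character-counting loops and running maximum with a one-line tokenize-and-maximize: split each sentence on a single space and take the max token-list length, default 1 for the empty list.
import Mathlib
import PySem

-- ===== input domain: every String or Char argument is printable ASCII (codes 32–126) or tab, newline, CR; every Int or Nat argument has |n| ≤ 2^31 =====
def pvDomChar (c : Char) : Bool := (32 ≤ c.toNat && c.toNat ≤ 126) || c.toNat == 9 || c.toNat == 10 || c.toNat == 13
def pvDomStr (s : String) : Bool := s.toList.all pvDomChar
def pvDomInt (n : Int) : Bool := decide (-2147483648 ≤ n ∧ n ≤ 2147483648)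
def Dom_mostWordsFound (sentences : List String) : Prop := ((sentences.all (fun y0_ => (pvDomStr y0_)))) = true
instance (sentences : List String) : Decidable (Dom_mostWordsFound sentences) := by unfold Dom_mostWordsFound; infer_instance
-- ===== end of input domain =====

-- B is a simpler one-liner: max over sentences of the split(" ") token count, default 1.

-- ===== PORT A =====
-- literal port: running Max over sentences, inner loop counting ' ' chars, return Max+1
def mostWordsFound (sentences : List String) : Int :=
  (sentences.foldl
    (fun Max i =>
      max Max (i.toList.foldl (fun Count j => if j = ' ' then Count + 1 else Count) (0 : Int)))
    0) + 1

-- ===== PORT B =====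
-- s.split(" ") with the nonempty separator " " is PySem.Chars.splitOn s.toList [' '];
-- max(gen, default=1) is PySem.List.max? with the none branch returning 1
def mostWordsFound_alt (sentences : List String) : Int :=
  match PySem.List.max?
      (sentences.map (fun s => ((PySem.Chars.splitOn s.toList [' ']).length : Int)))
      (fun x => x) with
  | some m => m
  | none => 1

-- ===== PRECONDITION & SPEC =====
def Spec_mostWordsFound (sentences : List String) (out : Int) : Prop := out = mostWordsFound_alt sentences
instance (sentences : List String) (out : Int) : Decidable (Spec_mostWordsFound sentences out) := by unfold Spec_mostWordsFound; infer_instance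

-- ===== CLAIM (what is proved, stated in full; the proofs are below) =====
def Claim_equal_mostWordsFound : Prop := ∀ (sentences : List String), Dom_mostWordsFound sentences → Spec_mostWordsFound sentences (mostWordsFound sentences)

-- ===== LEMMAS AND PROOFS =====

-- A's inner loop counts the spaces
theorem foldl_count_space (s : List Char) (n : Int) :
    s.foldl (fun Count j => if j = ' ' then Count + 1 else Count) n = n + (s.count ' ' : Int) := by
  induction s generalizing n with
  | nil => simp
  | cons c t ih =>
    by_cases h : c = ' '
    · simp [List.foldl_cons, h, ih]; ring
    · simp [List.foldl_cons, h, ih]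

-- splitOn with a single-space separator yields (count ' ') + 1 pieces
set_option maxRecDepth 4000 in
theorem splitOn_go_cons (sep : List Char) (n : Nat) (c : Char) (rest cur : List Char)
    (acc : List (List Char)) :
    PySem.Chars.splitOn.go sep (n + 1) (c :: rest) cur acc =
      if sep.isPrefixOf (c :: rest) then
        PySem.Chars.splitOn.go sep n (List.drop sep.length (c :: rest)) [] (cur.reverse :: acc)
      else PySem.Chars.splitOn.go sep n rest (c :: cur) acc := by
  rw [PySem.Chars.splitOn.go]

theorem splitOn_go_space_len (fuel : Nat) (l cur : List Char) (acc : List (List Char))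
    (h : l.length < fuel) :
    (PySem.Chars.splitOn.go [' '] fuel l cur acc).length = acc.length + 1 + l.count ' ' := by
  induction fuel generalizing l cur acc with
  | zero => omega
  | succ n ih =>
    cases l with
    | nil => simp [PySem.Chars.splitOn.go]
    | cons c rest =>
      rw [splitOn_go_cons]
      by_cases hc : c = ' '
      · subst hc
        rw [if_pos (by simp)]
        have h2 := ih rest [] (cur.reverse :: acc) (by simp at h; omega)
        simp only [List.length_singleton, List.drop_one, List.tail_cons]
        rw [h2]
        simp
        omega
      · have hfalse : [' '].isPrefixOf (c :: rest) = false := by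
          simp only [List.isPrefixOf, Bool.and_eq_false_iff, beq_eq_false_iff_ne, ne_eq]
          exact Or.inl (fun h' => hc h'.symm)
        rw [if_neg (by simp [hfalse])]
        have h2 := ih rest (c :: cur) acc (by simp at h; omega)
        rw [h2]
        simp [hc]

theorem splitOn_space_len (s : List Char) :
    (PySem.Chars.splitOn s [' ']).length = s.count ' ' + 1 := by
  have h := splitOn_go_space_len (s.length + 1) s [] [] (by omega)
  unfold PySem.Chars.splitOn
  rw [h]
  simp
  omega

-- the running max commutes with +1
theorem foldl_max_shift (t : List Int) (x : Int) :
    (t.map (fun c => c + 1)).foldl max (x + 1) = t.foldl max x + 1 := by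
  induction t generalizing x with
  | nil => simp
  | cons c r ih => simp [List.foldl_cons, max_add_add_right, ih]

-- ===== VERDICT (by name: the statement is the Claim_ definition above) =====
theorem mostWordsFound_spec : Claim_equal_mostWordsFound := by
  intro sentences _
  unfold Spec_mostWordsFound mostWordsFound mostWordsFound_alt
  cases sentences with
  | nil => simp [PySem.List.max?]
  | cons s t =>
    have hmap : ∀ u : List String,
        u.map (fun s => ((PySem.Chars.splitOn s.toList [' ']).length : Int))
          = (u.map (fun s => (s.toList.count ' ' : Int))).map (fun c => c + 1) := by
      intro u
      simp [splitOn_space_len, Function.comp_def]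
    rw [hmap]
    simp only [List.map_cons]
    rw [PySem.List.max?_id_cons]
    -- left side: A's fold; rewrite inner loops to counts
    have hA : ∀ (u : List String) (m : Int),
        u.foldl (fun Max i =>
            max Max (i.toList.foldl (fun Count j => if j = ' ' then Count + 1 else Count) (0 : Int))) m
          = (u.map (fun s => (s.toList.count ' ' : Int))).foldl max m := by
      intro u
      induction u with
      | nil => intro m; rfl
      | cons a r ih =>
        intro m
        rw [List.foldl_cons, ih]
        simp [foldl_count_space]
    rw [hA]
    simp only [List.map_cons, List.foldl_cons]
    have h0 : max (0 : Int) ((s.toList.count ' ' : Int)) = (s.toList.count ' ' : Int) := by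
      exact max_eq_right (by positivity)
    rw [h0, ← foldl_max_shift]
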